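-- pv_equiv track=rewrite | github.com/CLM-BONNY/algorithm | 프로그래머스/0/181925. 수 조작하기 2/수 조작하기 2.py | solution
-- ===== SOURCE A (Python) =====
-- def solution(numLog):
--     answer = ''
--     prev_num = numLog[0]
--
--     for i in range(1, len(numLog)):
--         if prev_num + 1 == numLog[i]:
--             answer += 'w'
--         elif prev_num - 1 == numLog[i]:
--             answer += 's'
--         elif prev_num + 10 == numLog[i]:
--             answer += 'd'
--         else:
--             answer += 'a'
--         prev_num = numLog[i]
--     return answer
-- ===== SOURCE B (Python) =====
-- def solution(numLog):
--     dirs = {1: 'w', -1: 's', 10: 'd'}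
--
--     def rec(lo, hi):
--         # direction chars for the consecutive pairs (i, i+1) with lo <= i < hi
--         if hi - lo <= 0:
--             return ''
--         if hi - lo == 1:
--             return dirs.get(numLog[lo + 1] - numLog[lo], 'a')
--         mid = (lo + hi) // 2
--         return rec(lo, mid) + rec(mid, hi)
--
--     return rec(0, len(numLog) - 1)
-- ===== Notes on version B (the rewrite author's own statement) =====
-- stated objective: alternative
-- what changed: Replaces the single left-to-right scan with mutable prev/answer state by a divide-and-conquer recursion on index ranges that splits the pair range at its midpoint, computes each half independently and concatenates; correctness holds because the output is the concatenation of one direction character per consecutive pair, which concatenation of subranges preserves.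
import Mathlib
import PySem

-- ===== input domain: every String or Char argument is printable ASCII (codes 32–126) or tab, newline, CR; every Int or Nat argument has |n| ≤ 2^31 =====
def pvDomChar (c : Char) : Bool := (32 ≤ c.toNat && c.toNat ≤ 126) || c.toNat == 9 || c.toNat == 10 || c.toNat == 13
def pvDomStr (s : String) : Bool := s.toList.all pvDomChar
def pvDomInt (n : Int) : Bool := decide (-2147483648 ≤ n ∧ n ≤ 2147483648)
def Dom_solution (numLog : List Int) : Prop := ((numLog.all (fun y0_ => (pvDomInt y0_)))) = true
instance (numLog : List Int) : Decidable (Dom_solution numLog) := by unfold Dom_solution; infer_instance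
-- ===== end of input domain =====

-- B replaces A's stateful left-to-right scan by a divide-and-conquer recursion on the
-- range of consecutive pairs, splitting at the midpoint (objective: alternative).

-- ===== PORT A =====
-- the loop 'for i in range(1, len(numLog))': each step reads numLog[i] in order with prev carried
def solutionGo : List Int → Int → String → String
  | [], _, answer => answer
  | x :: xs, prev, answer =>
      solutionGo xs x (answer ++ (if prev + 1 = x then "w"
        else if prev - 1 = x then "s"
        else if prev + 10 = x then "d"
        else "a"))

def solution (numLog : List Int) : String :=
  match numLog with
  | [] => ""            -- Python raises IndexError on numLog[0]; excluded by Pre_solution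
  | h :: t => solutionGo t h ""

-- ===== PORT B =====
def solDirs : PySem.Dict Int String :=
  PySem.Dict.insert (PySem.Dict.insert (PySem.Dict.insert PySem.Dict.empty 1 "w") (-1) "s") 10 "d"

-- rec(lo, hi): only indices lo..hi with lo < hi are ever read, all in range, so getD's
-- default is never used; lo, hi are nonnegative in every reachable call.
def solRec (numLog : List Int) (lo hi : Nat) : String :=
  if hi ≤ lo then ""
  else if hi - lo = 1 then
    PySem.Dict.getD solDirs (numLog.getD (lo + 1) 0 - numLog.getD lo 0) "a"
  else
    solRec numLog lo ((lo + hi) / 2) ++ solRec numLog ((lo + hi) / 2) hi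
termination_by hi - lo
decreasing_by all_goals omega

def solution_alt (numLog : List Int) : String :=
  solRec numLog 0 (numLog.length - 1)

-- ===== PRECONDITION & SPEC =====
-- Pre_ excludes only the empty list, on which A raises IndexError.
def Pre_solution (numLog : List Int) : Prop := numLog ≠ []
instance (numLog : List Int) : Decidable (Pre_solution numLog) := by unfold Pre_solution; infer_instance
def pvWitness_solution : List Int := ([1, 2, 12, 11, 0])

def Spec_solution (numLog : List Int) (out : String) : Prop := out = solution_alt numLog
instance (numLog : List Int) (out : String) : Decidable (Spec_solution numLog out) := by unfold Spec_solution; infer_instance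

-- ===== CLAIM (what is proved, stated in full; the proofs are below) =====
def Claim_equal_solution : Prop := ∀ (numLog : List Int), Dom_solution numLog → Pre_solution numLog → Spec_solution numLog (solution numLog)

-- ===== LEMMAS AND PROOFS =====

-- the direction character of one consecutive pair, as B's table lookup computes it
def stepChar (a b : Int) : String := PySem.Dict.getD solDirs (b - a) "a"

-- the intended result, stated structurally: one character per consecutive pair, in order
def pairsStr : List Int → String
  | [] => ""
  | [_] => ""
  | a :: b :: t => stepChar a b ++ pairsStr (b :: t)

-- concatenation of a list of strings (the shape of B's divide-and-conquer result)
def sjoin : List String → String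
  | [] => ""
  | s :: t => s ++ sjoin t

theorem sjoin_append (l1 l2 : List String) : sjoin (l1 ++ l2) = sjoin l1 ++ sjoin l2 := by
  induction l1 with
  | nil => simp [sjoin]
  | cons s t ih => simp [sjoin, ih, String.append_assoc]

-- A's branch chain and B's table lookup pick the same single-character string.
theorem step_eq_lookup (prev x : Int) :
    (if prev + 1 = x then "w" else if prev - 1 = x then "s"
     else if prev + 10 = x then "d" else "a")
      = stepChar prev x := by
  unfold stepChar
  by_cases c1 : x - prev = 1
  · rw [if_pos (by omega), c1]; decide
  · by_cases c2 : x - prev = -1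
    · rw [if_neg (by omega), if_pos (by omega), c2]; decide
    · by_cases c3 : x - prev = 10
      · rw [if_neg (by omega), if_neg (by omega), if_pos (by omega), c3]; decide
      · rw [if_neg (by omega), if_neg (by omega), if_neg (by omega)]
        have hnone : List.find? (fun p => p.1 == x - prev)
            [((1:Int), "w"), (-1, "s"), (10, "d")] = none := by
          rw [List.find?_eq_none]
          intro p hp
          simp only [List.mem_cons, List.not_mem_nil, or_false] at hp
          rcases hp with h | h | h <;> subst h <;> simpa [beq_iff_eq] using by omega
        simp [solDirs, PySem.Dict.getD, PySem.Dict.insert, PySem.Dict.get?, PySem.Dict.empty, hnone]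

theorem solutionGo_eq (xs : List Int) : ∀ (prev : Int) (acc : String),
    solutionGo xs prev acc = acc ++ pairsStr (prev :: xs) := by
  induction xs with
  | nil => intro prev acc; simp [solutionGo, pairsStr]
  | cons x xs ih =>
      intro prev acc
      show solutionGo xs x _ = _
      rw [ih, step_eq_lookup]
      show _ = acc ++ (stepChar prev x ++ pairsStr (x :: xs))
      rw [String.append_assoc]

theorem range'_split (lo mid hi : Nat) (h1 : lo ≤ mid) (h2 : mid ≤ hi) :
    List.range' lo (hi - lo) = List.range' lo (mid - lo) ++ List.range' mid (hi - mid) := by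
  have h4 : List.range' lo (mid - lo) ++ List.range' (lo + 1 * (mid - lo)) (hi - mid)
      = List.range' lo ((mid - lo) + (hi - mid)) := List.range'_append
  rw [show lo + 1 * (mid - lo) = mid by omega] at h4
  rw [h4, show (mid - lo) + (hi - mid) = hi - lo by omega]

-- B's recursion over [lo, hi) equals the concatenated chars of that index range.
theorem solRec_eq_join (numLog : List Int) : ∀ (n lo hi : Nat), hi - lo = n →
    solRec numLog lo hi
      = sjoin ((List.range' lo (hi - lo)).map
          (fun i => stepChar (numLog.getD i 0) (numLog.getD (i + 1) 0))) := by
  intro n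
  induction n using Nat.strong_induction_on with
  | _ n ih =>
    intro lo hi hn
    rw [solRec]
    by_cases h0 : hi ≤ lo
    · rw [if_pos h0, show hi - lo = 0 by omega]
      simp [sjoin]
    · rw [if_neg h0]
      by_cases h1 : hi - lo = 1
      · rw [if_pos h1, h1]
        simp [List.range', sjoin, stepChar]
      · rw [if_neg h1]
        rw [ih ((lo + hi) / 2 - lo) (by omega) lo _ rfl,
            ih (hi - (lo + hi) / 2) (by omega) _ hi rfl]
        rw [range'_split lo ((lo + hi) / 2) hi (by omega) (by omega),
            List.map_append, sjoin_append]

theorem map_range'_shift (f : Nat → String) (s n : Nat) :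
    (List.range' (s + 1) n).map f = (List.range' s n).map (fun i => f (i + 1)) := by
  induction n generalizing s with
  | zero => simp
  | succ n ih => rw [List.range'_succ, List.range'_succ, List.map_cons, List.map_cons, ih]

-- the concatenated index form over the whole list is pairsStr
theorem join_range_eq_pairsStr (xs : List Int) :
    sjoin ((List.range' 0 (xs.length - 1)).map
        (fun i => stepChar (xs.getD i 0) (xs.getD (i + 1) 0))) = pairsStr xs := by
  induction xs with
  | nil => simp [pairsStr, sjoin]
  | cons a t ih =>
      cases t with
      | nil => simp [pairsStr, sjoin]
      | cons b t' =>
          have hlen : (a :: b :: t').length - 1 = ((b :: t').length - 1) + 1 := by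
            simp
          rw [hlen, List.range'_succ, List.map_cons]
          show stepChar _ _ ++ sjoin _ = _
          rw [show (0 : Nat) + 1 = 0 + 1 from rfl, map_range'_shift]
          have hmap : (List.range' 0 ((b :: t').length - 1)).map
              (fun i => stepChar ((a :: b :: t').getD (i + 1) 0) ((a :: b :: t').getD (i + 1 + 1) 0))
              = (List.range' 0 ((b :: t').length - 1)).map
              (fun i => stepChar ((b :: t').getD i 0) ((b :: t').getD (i + 1) 0)) := by
            apply List.map_congr_left
            intro i _
            simp
          rw [hmap, ih]
          simp [pairsStr, stepChar]

-- ===== VERDICT (by name: the statement is the Claim_ definition above) =====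
theorem solution_spec : Claim_equal_solution := by
  intro numLog _ hpre
  unfold Spec_solution solution_alt
  rw [solRec_eq_join numLog (numLog.length - 1 - 0) 0 (numLog.length - 1) rfl]
  simp only [Nat.sub_zero]
  rw [join_range_eq_pairsStr]
  match numLog, hpre with
  | h :: t, _ =>
    show solutionGo t h "" = _
    rw [solutionGo_eq]
    simp
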